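-- pv_equiv track=rewrite | github.com/baedonguri/JungleAlgorithm | 알고리즘스터디/week07/2920_음계.py | solution
-- ===== SOURCE A (Python) =====
-- def solution(arr):
--     start = arr[0]
--     if start == 8:
--         for i in range(len(arr)-1):
--             if arr[i] != arr[i+1]+1:
--                 return "mixed"
--         return 'descending'
--     else:
--         for i in range(len(arr)-1):
--             if arr[i]+1 != arr[i+1]:
--                 return "mixed"
--         return "ascending"
-- ===== SOURCE B (Python) =====
-- def solution(arr):
--     n = len(arr)
--     if arr[0] == 8:
--         exp = list(range(8, 8 - n, -1))
--         return 'descending' if arr == exp else 'mixed'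
--     else:
--         exp = list(range(arr[0], arr[0] + n))
--         return 'ascending' if arr == exp else 'mixed'
-- ===== Notes on version B (the rewrite author's own statement) =====
-- stated objective: alternative
-- what changed: Replaces A's element-by-element adjacent-difference loop with building the ideal ascending/descending run via range() and one whole-list equality comparison.
import Mathlib
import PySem

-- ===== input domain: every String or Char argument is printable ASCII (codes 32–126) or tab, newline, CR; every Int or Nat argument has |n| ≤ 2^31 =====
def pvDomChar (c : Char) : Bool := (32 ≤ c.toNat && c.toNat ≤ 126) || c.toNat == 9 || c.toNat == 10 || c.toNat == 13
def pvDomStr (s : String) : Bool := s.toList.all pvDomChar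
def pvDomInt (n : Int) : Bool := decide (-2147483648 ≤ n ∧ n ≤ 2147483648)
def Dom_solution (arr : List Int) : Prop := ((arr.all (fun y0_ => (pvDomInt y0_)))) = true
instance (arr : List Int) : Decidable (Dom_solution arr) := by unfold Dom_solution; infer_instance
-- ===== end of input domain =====

-- B builds the ideal run with range() and compares whole lists, instead of A's adjacent-element loop; same cost, different decomposition.

-- ===== PORT A =====
-- for i in range(len(arr)-1): if arr[i] != arr[i+1]+1: return "mixed"; then return 'descending'
def solDescLoop (arr : List Int) (i : Nat) : String :=
  if i < arr.length - 1 then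
    if arr.getD i 0 ≠ arr.getD (i + 1) 0 + 1 then "mixed"
    else solDescLoop arr (i + 1)
  else "descending"
termination_by arr.length - 1 - i

-- for i in range(len(arr)-1): if arr[i]+1 != arr[i+1]: return "mixed"; then return "ascending"
def solAscLoop (arr : List Int) (i : Nat) : String :=
  if i < arr.length - 1 then
    if arr.getD i 0 + 1 ≠ arr.getD (i + 1) 0 then "mixed"
    else solAscLoop arr (i + 1)
  else "ascending"
termination_by arr.length - 1 - i

def solution (arr : List Int) : String :=
  let start := arr.getD 0 0           -- arr[0]; Pre_ excludes the empty list, where Python raises IndexError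
  if start = 8 then solDescLoop arr 0
  else solAscLoop arr 0

-- ===== PORT B =====
def solution_alt (arr : List Int) : String :=
  let n : Int := arr.length
  if arr.getD 0 0 = 8 then            -- arr[0]; Pre_ excludes the empty list
    let exp := PySem.List.pyRange 8 (8 - n) (-1)
    if arr = exp then "descending" else "mixed"
  else
    let exp := PySem.List.pyRange (arr.getD 0 0) (arr.getD 0 0 + n) 1
    if arr = exp then "ascending" else "mixed"

-- ===== PRECONDITION & SPEC =====
-- Pre_ excludes only the empty list, on which Python A raises IndexError (arr[0]).
def Pre_solution (arr : List Int) : Prop := arr ≠ []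
instance (arr : List Int) : Decidable (Pre_solution arr) := by unfold Pre_solution; infer_instance
def pvWitness_solution : List Int := ([8, 7, 6])

def Spec_solution (arr : List Int) (out : String) : Prop := out = solution_alt arr
instance (arr : List Int) (out : String) : Decidable (Spec_solution arr out) := by unfold Spec_solution; infer_instance

-- ===== CLAIM (what is proved, stated in full; the proofs are below) =====
def Claim_equal_solution : Prop := ∀ (arr : List Int), Dom_solution arr → Pre_solution arr → Spec_solution arr (solution arr)

-- ===== LEMMAS AND PROOFS =====
def descChain : List Int → Bool
  | a :: b :: t => (a == b + 1) && descChain (b :: t)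
  | _ => true

def ascChain : List Int → Bool
  | a :: b :: t => (a + 1 == b) && ascChain (b :: t)
  | _ => true

theorem chain_short (l : List Int) (h : l.length ≤ 1) : descChain l = true ∧ ascChain l = true := by
  match l with
  | [] => exact ⟨rfl, rfl⟩
  | [a] => exact ⟨rfl, rfl⟩
  | a :: b :: t => simp at h

theorem drop_two (arr : List Int) (i : Nat) (h : i < arr.length - 1) :
    arr.drop i = arr.getD i 0 :: arr.getD (i+1) 0 :: arr.drop (i+2) := by
  have h1 : i < arr.length := by omega
  have h2 : i + 1 < arr.length := by omega
  rw [List.drop_eq_getElem_cons h1, List.drop_eq_getElem_cons h2,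
      List.getD_eq_getElem arr 0 h1, List.getD_eq_getElem arr 0 h2]

theorem solDescLoop_eq (arr : List Int) (i : Nat) :
    solDescLoop arr i = if descChain (arr.drop i) then "descending" else "mixed" := by
  fun_induction solDescLoop arr i with
  | case1 i h hne =>
    rw [drop_two arr i h]
    simp only [descChain, Bool.and_eq_true, beq_iff_eq]
    rw [if_neg (fun hc => hne hc.1)]
  | case2 i h hne ih =>
    rw [drop_two arr i h, ih]
    have he : arr.getD i 0 = arr.getD (i+1) 0 + 1 := by
      by_contra hc; exact hne hc
    have : arr.drop (i + 1) = arr.getD (i+1) 0 :: arr.drop (i+2) := by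
      have h2 : i + 1 < arr.length := by omega
      rw [List.drop_eq_getElem_cons h2, List.getD_eq_getElem arr 0 h2]
    rw [this]
    simp only [descChain, Bool.and_eq_true, beq_iff_eq, he, true_and]
  | case3 i h =>
    have : (arr.drop i).length ≤ 1 := by simp; omega
    rw [(chain_short _ this).1]
    simp

theorem solAscLoop_eq (arr : List Int) (i : Nat) :
    solAscLoop arr i = if ascChain (arr.drop i) then "ascending" else "mixed" := by
  fun_induction solAscLoop arr i with
  | case1 i h hne =>
    rw [drop_two arr i h]
    simp only [ascChain, Bool.and_eq_true, beq_iff_eq]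
    rw [if_neg (fun hc => hne hc.1)]
  | case2 i h hne ih =>
    rw [drop_two arr i h, ih]
    have he : arr.getD i 0 + 1 = arr.getD (i+1) 0 := by
      by_contra hc; exact hne hc
    have : arr.drop (i + 1) = arr.getD (i+1) 0 :: arr.drop (i+2) := by
      have h2 : i + 1 < arr.length := by omega
      rw [List.drop_eq_getElem_cons h2, List.getD_eq_getElem arr 0 h2]
    rw [this]
    simp only [ascChain, Bool.and_eq_true, beq_iff_eq, he, true_and]
  | case3 i h =>
    have : (arr.drop i).length ≤ 1 := by simp; omega
    rw [(chain_short _ this).2]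
    simp

theorem descChain_iff (a : Int) (l : List Int) :
    descChain (a :: l) = true ↔
      a :: l = PySem.List.pyRange a (a - ((a :: l).length : Int)) (-1) := by
  induction l generalizing a with
  | nil =>
    rw [PySem.List.pyRange_neg_one_cons
          (by simp only [List.length_cons, List.length_nil]; omega),
        PySem.List.pyRange_neg_one_eq_nil
          (by simp only [List.length_cons, List.length_nil]; omega)]
    simp [descChain]
  | cons b t ih =>
    rw [PySem.List.pyRange_neg_one_cons
          (by simp only [List.length_cons]; push_cast; omega),
        List.cons_eq_cons]
    simp only [descChain, Bool.and_eq_true, beq_iff_eq]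
    constructor
    · rintro ⟨hab, hc⟩
      refine ⟨by trivial, ?_⟩
      have h2 : PySem.List.pyRange (a - 1) (a - ((a :: b :: t).length : Int)) (-1)
          = PySem.List.pyRange b (b - ((b :: t).length : Int)) (-1) := by
        congr 1
        all_goals push_cast [List.length_cons]; omega
      rw [h2]
      exact (ih b).mp hc
    · rintro ⟨-, htail⟩
      have hb : b = a - 1 := by
        rw [PySem.List.pyRange_neg_one_cons
              (by simp only [List.length_cons]; push_cast; omega),
            List.cons_eq_cons] at htail
        exact htail.1
      refine ⟨by omega, ?_⟩
      apply (ih b).mpr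
      have h2 : PySem.List.pyRange b (b - ((b :: t).length : Int)) (-1)
          = PySem.List.pyRange (a - 1) (a - ((a :: b :: t).length : Int)) (-1) := by
        congr 1
        all_goals push_cast [List.length_cons]; omega
      rw [h2]
      exact htail

theorem ascChain_iff (a : Int) (l : List Int) :
    ascChain (a :: l) = true ↔
      a :: l = PySem.List.pyRange a (a + ((a :: l).length : Int)) 1 := by
  induction l generalizing a with
  | nil =>
    rw [PySem.List.pyRange_one_cons
          (by simp only [List.length_cons, List.length_nil]; omega),
        PySem.List.pyRange_one_eq_nil
          (by simp only [List.length_cons, List.length_nil]; omega)]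
    simp [ascChain]
  | cons b t ih =>
    rw [PySem.List.pyRange_one_cons
          (by simp only [List.length_cons]; push_cast; omega),
        List.cons_eq_cons]
    simp only [ascChain, Bool.and_eq_true, beq_iff_eq]
    constructor
    · rintro ⟨hab, hc⟩
      refine ⟨by trivial, ?_⟩
      have h2 : PySem.List.pyRange (a + 1) (a + ((a :: b :: t).length : Int)) 1
          = PySem.List.pyRange b (b + ((b :: t).length : Int)) 1 := by
        congr 1
        all_goals push_cast [List.length_cons]; omega
      rw [h2]
      exact (ih b).mp hc
    · rintro ⟨-, htail⟩
      have hb : b = a + 1 := by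
        rw [PySem.List.pyRange_one_cons
              (by simp only [List.length_cons]; push_cast; omega),
            List.cons_eq_cons] at htail
        exact htail.1
      refine ⟨by omega, ?_⟩
      apply (ih b).mpr
      have h2 : PySem.List.pyRange b (b + ((b :: t).length : Int)) 1
          = PySem.List.pyRange (a + 1) (a + ((a :: b :: t).length : Int)) 1 := by
        congr 1
        all_goals push_cast [List.length_cons]; omega
      rw [h2]
      exact htail

-- ===== VERDICT (by name: the statement is the Claim_ definition above) =====
theorem solution_spec : Claim_equal_solution := by
  intro arr _ hpre
  unfold Spec_solution solution solution_alt
  obtain ⟨a, l, rfl⟩ : ∃ a l, arr = a :: l := by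
    cases arr with
    | nil => exact absurd rfl hpre
    | cons a l => exact ⟨a, l, rfl⟩
  simp only [List.getD_cons_zero, List.length_cons]
  by_cases h8 : a = 8
  · subst h8
    rw [if_pos rfl, if_pos rfl, solDescLoop_eq, List.drop_zero]
    have h := descChain_iff 8 l
    simp only [List.length_cons] at h
    push_cast at h ⊢
    exact if_congr h rfl rfl
  · rw [if_neg h8, if_neg h8, solAscLoop_eq, List.drop_zero]
    have h := ascChain_iff a l
    simp only [List.length_cons] at h
    push_cast at h ⊢
    exact if_congr h rfl rfl
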